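-- pv_equiv track=rewrite | github.com/Wayne0758/leetcode | Wayne0758/leetcode/3390-minimum-rectangles-to-cover-points/solution.py | minRectanglesToCoverPoints
-- ===== SOURCE A (Python) =====
-- from typing import List
--
-- def minRectanglesToCoverPoints(points: List[List[int]], w: int) -> int:
--     d=set()
--     for point in points:
--         d.add(point[0])
--     a=list(d)
--     a.sort()
--     b=a[0]+w
--     res=1
--     s=0
--     while a:
--         if a[0]<=b:
--             s=a.pop(0)
--         else:
--             s=a.pop(0)
--             res+=1
--             b=s+w
--     return res
-- ===== SOURCE B (Python) =====
-- def minRectanglesToCoverPoints(points, w):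
--     xs = sorted({p[0] for p in points})
--     res = 1
--     b = xs[0] + w
--     for x in xs:
--         if x > b:
--             res += 1
--             b = x + w
--     return res
-- ===== Notes on version B (the rewrite author's own statement) =====
-- stated objective: simpler
-- what changed: Replaced the explicit set-building loop and the while-loop that pops a[0] from the list by a one-line sorted(set(...)) and a single index-free for-pass carrying (count, right edge).
import Mathlib
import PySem

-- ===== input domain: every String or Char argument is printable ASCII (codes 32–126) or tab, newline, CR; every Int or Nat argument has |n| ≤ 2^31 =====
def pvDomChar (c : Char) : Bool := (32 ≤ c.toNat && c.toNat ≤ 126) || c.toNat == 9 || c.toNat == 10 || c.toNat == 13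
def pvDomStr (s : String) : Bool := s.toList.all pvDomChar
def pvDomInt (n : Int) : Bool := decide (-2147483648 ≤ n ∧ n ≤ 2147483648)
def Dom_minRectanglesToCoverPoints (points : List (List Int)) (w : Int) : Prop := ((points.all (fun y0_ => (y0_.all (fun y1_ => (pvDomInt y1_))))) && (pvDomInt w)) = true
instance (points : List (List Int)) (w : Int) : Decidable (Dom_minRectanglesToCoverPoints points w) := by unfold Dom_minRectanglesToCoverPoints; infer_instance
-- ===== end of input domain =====

-- B replaces A's set-building loop and destructive pop(0) while-loop by sorted(set(...)) and one for-pass carrying (count, right edge) (objective: simpler).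

-- ===== PORT A =====
-- point[0] (raises IndexError on an empty inner list; Pre_ excludes that, default 0 is never used inside Pre_)
def pvGet0 (p : List Int) : Int := (PySem.List.pyGet? p 0).getD 0

-- the 'while a:' loop of A: pops a[0] each turn, bumps res and b when a[0] > b
def pvLoopA (w : Int) : List Int → Int → Int → Int
  | [], _, res => res
  | x :: rest, b, res =>
      if x ≤ b then pvLoopA w rest b res
      else pvLoopA w rest (x + w) (res + 1)

def minRectanglesToCoverPoints (points : List (List Int)) (w : Int) : Int :=
  let d := points.foldl (fun d point => PySem.Set.add d (pvGet0 point)) PySem.Set.empty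
  let a := PySem.List.sorted d (fun x => x) false
  let b := (PySem.List.pyGet? a 0).getD 0 + w
  pvLoopA w a b 1

-- ===== PORT B =====
def minRectanglesToCoverPoints_alt (points : List (List Int)) (w : Int) : Int :=
  let xs := PySem.List.sorted (PySem.Set.ofList (points.map (fun p => pvGet0 p))) (fun x => x) false
  let init : Int × Int := (1, (PySem.List.pyGet? xs 0).getD 0 + w)
  (xs.foldl (fun st x => if x > st.2 then (st.1 + 1, x + w) else st) init).1

-- ===== PRECONDITION & SPEC =====
-- Pre_ excludes exactly the inputs on which Python A raises IndexError: empty points (a[0]) or an empty inner list (point[0]).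
def Pre_minRectanglesToCoverPoints (points : List (List Int)) (w : Int) : Prop :=
  points ≠ [] ∧ ∀ p ∈ points, p ≠ []
instance (points : List (List Int)) (w : Int) : Decidable (Pre_minRectanglesToCoverPoints points w) := by unfold Pre_minRectanglesToCoverPoints; infer_instance
def pvWitness_minRectanglesToCoverPoints : List (List Int) × Int := ([[2, 1], [1, 0], [1, 4]], 1)

def Spec_minRectanglesToCoverPoints (points : List (List Int)) (w : Int) (out : Int) : Prop := out = minRectanglesToCoverPoints_alt points w
instance (points : List (List Int)) (w : Int) (out : Int) : Decidable (Spec_minRectanglesToCoverPoints points w out) := by unfold Spec_minRectanglesToCoverPoints; infer_instance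

-- ===== CLAIM (what is proved, stated in full; the proofs are below) =====
def Claim_equal_minRectanglesToCoverPoints : Prop := ∀ (points : List (List Int)) (w : Int), Dom_minRectanglesToCoverPoints points w → Pre_minRectanglesToCoverPoints points w → Spec_minRectanglesToCoverPoints points w (minRectanglesToCoverPoints points w)

-- ===== LEMMAS AND PROOFS =====

-- A's while loop is B's foldl, with the pair state split into two accumulators
theorem pvLoopA_eq_foldl (w : Int) (l : List Int) (b res : Int) :
    pvLoopA w l b res = (l.foldl (fun (st : Int × Int) x => if x > st.2 then (st.1 + 1, x + w) else st) (res, b)).1 := by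
  induction l generalizing b res with
  | nil => rfl
  | cons x rest ih =>
      simp only [pvLoopA, List.foldl_cons]
      by_cases h : x ≤ b
      · rw [if_pos h, if_neg (by omega), ih]
      · rw [if_neg h, if_pos (by omega), ih]

-- A's set built by repeated add equals set(points mapped to first coordinates)
theorem pvSet_eq (points : List (List Int)) :
    points.foldl (fun d point => PySem.Set.add d (pvGet0 point)) PySem.Set.empty
      = PySem.Set.ofList (points.map (fun p => pvGet0 p)) := by
  rw [PySem.Set.ofList_eq_foldl, List.foldl_map]
  rfl

-- ===== VERDICT (by name: the statement is the Claim_ definition above) =====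
theorem minRectanglesToCoverPoints_spec : Claim_equal_minRectanglesToCoverPoints := by
  intro points w _ _
  unfold Spec_minRectanglesToCoverPoints minRectanglesToCoverPoints minRectanglesToCoverPoints_alt
  rw [pvSet_eq, pvLoopA_eq_foldl]
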